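-- pv_equiv track=rewrite | github.com/bbrighttaer/jova_baselines | proj/dti/build_prot_vocabs.py | group_ngrams
-- ===== SOURCE A (Python) =====
-- def group_ngrams(p_words, window, fill_value):
--     """
--
--     :param p_words:
--     :param window:
--     :param fill_value: Index for retrieving all zeros for padded regions. When loading the pre-trained
--     embedding matrix, this row is filled with zeros. This is set as an additional row (last row) of the matrix.
--     :return:
--     """
--     w = []
--     start = 0
--     for i in range(len(p_words) // window + 1):
--         grouped_words = p_words[start:start + window]
--         grouped_words = grouped_words + [fill_value] * (window - len(grouped_words))
--         w.append(grouped_words)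
--         start += window
--     return w
-- ===== SOURCE B (Python) =====
-- def group_ngrams(p_words, window, fill_value):
--     w = []
--     cur = []
--     for x in p_words:
--         cur.append(x)
--         if len(cur) == window:
--             w.append(cur)
--             cur = []
--     cur.extend([fill_value] * (window - len(cur)))
--     w.append(cur)
--     return w
-- ===== Notes on version B (the rewrite author's own statement) =====
-- stated objective: alternative
-- what changed: B is a single streaming pass over the elements with a current-buffer accumulator that flushes whenever it reaches window size and pads only the final buffer, instead of A's counted loop that computes len//window+1 and slices-and-pads each chunk by index arithmetic.
-- outside the precondition, e.g. on group_ngrams([1], -2, 0): A returns [], B returns [[1]]; on group_ngrams([], -1, 7): A returns [[]], B returns [[]]; on group_ngrams([1, 2], 0, 5): A raises ZeroDivisionError, B returns [[1, 2]]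
import Mathlib
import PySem

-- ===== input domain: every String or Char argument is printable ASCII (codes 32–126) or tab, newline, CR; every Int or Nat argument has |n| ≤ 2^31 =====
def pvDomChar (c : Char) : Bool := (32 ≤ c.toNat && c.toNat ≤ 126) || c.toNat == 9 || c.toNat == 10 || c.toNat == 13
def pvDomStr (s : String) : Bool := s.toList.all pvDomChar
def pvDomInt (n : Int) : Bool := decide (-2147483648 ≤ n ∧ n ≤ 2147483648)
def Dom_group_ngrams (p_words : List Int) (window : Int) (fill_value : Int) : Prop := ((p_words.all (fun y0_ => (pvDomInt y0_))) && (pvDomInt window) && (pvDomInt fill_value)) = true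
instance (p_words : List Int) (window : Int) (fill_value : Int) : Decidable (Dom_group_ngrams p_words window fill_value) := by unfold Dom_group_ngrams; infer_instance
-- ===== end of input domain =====

-- B streams the elements once into a current-buffer accumulator, flushing each time the
-- buffer reaches window size and padding only the final buffer, instead of A's counted
-- loop over len//window+1 index-arithmetic slices (objective: alternative; no mutation).

-- ===== PORT A =====
def group_ngrams (p_words : List Int) (window : Int) (fill_value : Int) : List (List Int) :=
  -- w = []; start = 0; for i in range(len(p_words)//window + 1): …
  ((PySem.List.pyRange 0 (PySem.Int.floordiv (p_words.length : Int) window + 1) 1).foldl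
    (fun (st : List (List Int) × Int) _i =>
      -- grouped_words = p_words[start:start+window]
      let grouped := PySem.List.slice p_words (some st.2) (some (st.2 + window))
      -- grouped_words = grouped_words + [fill_value] * (window - len(grouped_words))
      let grouped := grouped ++ List.replicate (window - (grouped.length : Int)).toNat fill_value
      (st.1 ++ [grouped], st.2 + window))
    ([], 0)).1

-- ===== PORT B =====
def group_ngrams_alt (p_words : List Int) (window : Int) (fill_value : Int) : List (List Int) :=
  -- w = []; cur = []; for x in p_words: cur = cur + [x]; if len(cur) == window: w.append(cur); cur = []
  let st := p_words.foldl
    (fun (st : List (List Int) × List Int) x =>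
      let cur := st.2 ++ [x]
      if (cur.length : Int) = window then (st.1 ++ [cur], []) else (st.1, cur))
    ([], [])
  -- w.append(cur + [fill_value] * (window - len(cur)))
  st.1 ++ [st.2 ++ List.replicate (window - (st.2.length : Int)).toNat fill_value]

-- ===== PRECONDITION & SPEC =====
-- Pre_ excludes window ≤ 0: on window = 0 Python A raises ZeroDivisionError, and for
-- negative windows A's output ([] or [[]]) is an accident of floor division on a
-- window no chunking function is meant to take.
def Pre_group_ngrams (p_words : List Int) (window : Int) (fill_value : Int) : Prop := 1 ≤ window
instance (p_words : List Int) (window : Int) (fill_value : Int) : Decidable (Pre_group_ngrams p_words window fill_value) := by unfold Pre_group_ngrams; infer_instance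
def pvWitness_group_ngrams : List Int × Int × Int := ([1, 2, 3], 2, 0)

def Spec_group_ngrams (p_words : List Int) (window : Int) (fill_value : Int) (out : List (List Int)) : Prop := out = group_ngrams_alt p_words window fill_value
instance (p_words : List Int) (window : Int) (fill_value : Int) (out : List (List Int)) : Decidable (Spec_group_ngrams p_words window fill_value out) := by unfold Spec_group_ngrams; infer_instance

-- ===== CLAIM (what is proved, stated in full; the proofs are below) =====
def Claim_equal_group_ngrams : Prop := ∀ (p_words : List Int) (window : Int) (fill_value : Int), Dom_group_ngrams p_words window fill_value → Pre_group_ngrams p_words window fill_value → Spec_group_ngrams p_words window fill_value (group_ngrams p_words window fill_value)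

-- ===== LEMMAS AND PROOFS =====

-- A's loop body (the loop variable i is unused by A's body)
def gnStep (p_words : List Int) (window : Int) (fill_value : Int)
    (st : List (List Int) × Int) : List (List Int) × Int :=
  let grouped := PySem.List.slice p_words (some st.2) (some (st.2 + window))
  let grouped := grouped ++ List.replicate (window - (grouped.length : Int)).toNat fill_value
  (st.1 ++ [grouped], st.2 + window)

-- A's chunk at start index s
def gnChunk (p_words : List Int) (window : Int) (fill_value : Int) (s : Int) : List Int :=
  let grouped := PySem.List.slice p_words (some s) (some (s + window))
  grouped ++ List.replicate (window - (grouped.length : Int)).toNat fill_value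

-- B's loop body, for window = wn
def bStep (wn : Nat) (st : List (List Int) × List Int) (x : Int) : List (List Int) × List Int :=
  let cur := st.2 ++ [x]
  if (cur.length : Int) = (wn : Int) then (st.1 ++ [cur], []) else (st.1, cur)

-- the common recursive chunking both ports compute (proof-side reference only)
def chunkRec (wn : Nat) (f : Int) (p : List Int) : List (List Int) :=
  if h : p.length < wn ∨ wn = 0 then [p ++ List.replicate (wn - p.length) f]
  else p.take wn :: chunkRec wn f (p.drop wn)
termination_by p.length
decreasing_by simp only [List.length_drop]; omega

lemma foldl_const_fun {α β : Type} (f : β → β) (l : List α) (init : β) :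
    l.foldl (fun st _ => f st) init = f^[l.length] init := by
  induction l generalizing init with
  | nil => rfl
  | cons a t ih => simp [List.foldl_cons, ih, Function.iterate_succ_apply]

lemma gnStep_iterate (p : List Int) (w f : Int) (m : Nat) :
    (gnStep p w f)^[m] ([], 0) =
      ((List.range m).map (fun i : Nat => gnChunk p w f ((i : Int) * w)), (m : Int) * w) := by
  induction m with
  | zero => simp
  | succ m ih =>
      rw [Function.iterate_succ_apply', ih]
      simp only [gnStep, gnChunk, List.range_succ, List.map_append, List.map_cons, List.map_nil,
        Prod.mk.injEq]
      exact ⟨trivial, by push_cast; ring⟩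

-- A's chunk at a natural start index, as drop/take plus padding
lemma gnChunk_natCast (p : List Int) (wn : Nat) (f : Int) (j : Nat) :
    gnChunk p (wn : Int) f ((j : Int)) =
      (p.drop j).take wn ++ List.replicate (wn - min wn (p.length - j)) f := by
  unfold gnChunk
  rw [PySem.List.slice_natCast_add]
  show (p.drop j).take wn ++
      List.replicate ((wn : Int) - ((((p.drop j).take wn).length : Nat) : Int)).toNat f = _
  have hl : (((p.drop j).take wn).length : Int) = ((min wn (p.length - j) : Nat) : Int) := by
    simp
  rw [hl, Int.toNat_sub]

-- A's closed form equals the recursive chunker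
lemma chunk_map_eq (wn : Nat) (f : Int) (hwn : 1 ≤ wn) :
    ∀ (n : Nat) (p : List Int), p.length / wn = n →
      (List.range (n + 1)).map (fun i : Nat => gnChunk p (wn : Int) f ((i : Int) * (wn : Int)))
        = chunkRec wn f p := by
  intro n
  induction n with
  | zero =>
      intro p hp
      have hlt : p.length < wn := Nat.lt_of_div_eq_zero (by omega) hp
      rw [chunkRec, dif_pos (Or.inl hlt)]
      rw [show (0 + 1) = 1 from rfl, List.range_one, List.map_cons, List.map_nil]
      rw [show (((0 : Nat) : Int) * (wn : Int)) = ((0 : Nat) : Int) by push_cast; ring,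
        gnChunk_natCast]
      simp only [List.drop_zero, Nat.sub_zero]
      rw [List.take_of_length_le hlt.le, Nat.min_eq_right hlt.le]
  | succ n ih =>
      intro p hp
      have hge : wn ≤ p.length := by
        by_contra hcon
        rw [Nat.div_eq_of_lt (by omega)] at hp; omega
      rw [chunkRec, dif_neg (by omega)]
      have hdrop : (p.drop wn).length / wn = n := by
        have h1 : (p.drop wn).length = p.length - wn := List.length_drop
        rw [Nat.div_eq_sub_div (by omega : 0 < wn) hge] at hp
        rw [h1]
        omega
      rw [List.range_succ_eq_map, List.map_cons, List.map_map]
      congr 1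
      · rw [show ((0 : Nat) : Int) * (wn : Int) = ((0 : Nat) : Int) by push_cast; ring,
          gnChunk_natCast]
        rw [Nat.min_eq_left (by omega), Nat.sub_self, List.replicate_zero, List.append_nil,
          List.drop_zero]
      · rw [← ih (p.drop wn) hdrop]
        apply List.map_congr_left
        intro k _
        simp only [Function.comp_apply]
        rw [show ((k.succ : Int)) * (wn : Int) = (((k * wn + wn : Nat)) : Int) by push_cast; ring,
          gnChunk_natCast,
          show ((k : Int)) * (wn : Int) = (((k * wn : Nat)) : Int) by push_cast; ring,
          gnChunk_natCast]
        rw [List.drop_drop, List.length_drop]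
        congr 3
        · omega
        · omega

-- streaming over too-few elements never flushes
lemma bStep_small (wn : Nat) :
    ∀ (p : List Int) (acc : List (List Int)) (cur : List Int),
      cur.length + p.length < wn → p.foldl (bStep wn) (acc, cur) = (acc, cur ++ p) := by
  intro p
  induction p with
  | nil => intro acc cur _; simp
  | cons x t ih =>
      intro acc cur h
      simp only [List.foldl_cons]
      rw [show bStep wn (acc, cur) x = (acc, cur ++ [x]) by
        unfold bStep
        simp only
        rw [if_neg (by
          simp only [List.length_append, List.length_cons, List.length_nil]
          intro hc
          have : cur.length + 1 = wn := by exact_mod_cast hc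
          simp at h; omega)]]
      rw [ih _ _ (by simp at h ⊢; omega)]
      simp

-- streaming over a segment that exactly fills the buffer flushes it
lemma bStep_fill (wn : Nat) :
    ∀ (q rest : List Int) (acc : List (List Int)) (cur : List Int),
      cur.length + q.length = wn → q ≠ [] →
      (q ++ rest).foldl (bStep wn) (acc, cur) = rest.foldl (bStep wn) (acc ++ [cur ++ q], []) := by
  intro q
  induction q with
  | nil => intro rest acc cur _ hne; exact absurd rfl hne
  | cons x t ih =>
      intro rest acc cur hlen _
      cases t with
      | nil =>
          simp only [List.cons_append, List.nil_append, List.foldl_cons]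
          rw [show bStep wn (acc, cur) x = (acc ++ [cur ++ [x]], []) by
            unfold bStep
            simp only
            rw [if_pos (by
              simp only [List.length_append, List.length_cons, List.length_nil]
              simp at hlen; exact_mod_cast congrArg (Nat.cast : Nat → Int) (by omega))]]
      | cons y t' =>
          rw [List.cons_append, List.foldl_cons]
          rw [show bStep wn (acc, cur) x = (acc, cur ++ [x]) by
            unfold bStep
            simp only
            rw [if_neg (by
              simp only [List.length_append, List.length_cons, List.length_nil]
              intro hc
              have : cur.length + 1 = wn := by exact_mod_cast hc
              simp at hlen; omega)]]
          rw [ih rest acc (cur ++ [x]) (by simp at hlen ⊢; omega) (by simp)]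
          simp

-- B equals the recursive chunker
lemma b_eq_chunkRec (wn : Nat) (f : Int) (hwn : 1 ≤ wn) :
    ∀ (n : Nat) (p : List Int) (acc : List (List Int)), p.length / wn = n →
      (let st := p.foldl (bStep wn) (acc, []);
        st.1 ++ [st.2 ++ List.replicate ((wn : Int) - (st.2.length : Int)).toNat f])
        = acc ++ chunkRec wn f p := by
  intro n
  induction n with
  | zero =>
      intro p acc hp
      have hlt : p.length < wn := Nat.lt_of_div_eq_zero (by omega) hp
      rw [chunkRec, dif_pos (Or.inl hlt)]
      simp only
      rw [bStep_small wn p acc [] (by simpa using hlt)]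
      simp only [List.nil_append]
      rw [Int.toNat_sub]
  | succ n ih =>
      intro p acc hp
      have hge : wn ≤ p.length := by
        by_contra hcon
        rw [Nat.div_eq_of_lt (by omega)] at hp; omega
      rw [chunkRec, dif_neg (by omega)]
      have hdrop : (p.drop wn).length / wn = n := by
        have h1 : (p.drop wn).length = p.length - wn := List.length_drop
        rw [Nat.div_eq_sub_div (by omega : 0 < wn) hge] at hp
        rw [h1]
        omega
      have hsplit : p = p.take wn ++ p.drop wn := (List.take_append_drop wn p).symm
      conv_lhs => rw [hsplit]
      rw [bStep_fill wn (p.take wn) (p.drop wn) acc []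
        (by simp; omega)
        (by
          intro hc
          have h2 := congrArg List.length hc
          rw [List.length_take, List.length_nil] at h2
          omega)]
      simp only [List.nil_append]
      rw [ih (p.drop wn) (acc ++ [p.take wn]) hdrop]
      simp

-- ===== VERDICT (by name: the statement is the Claim_ definition above) =====
theorem group_ngrams_spec : Claim_equal_group_ngrams := by
  intro p w f _ hw
  unfold Spec_group_ngrams
  have hw1 : (1 : Int) ≤ w := hw
  obtain ⟨wn, rfl⟩ : ∃ wn : Nat, ((wn : Nat) : Int) = w :=
    ⟨w.toNat, Int.toNat_of_nonneg (by omega)⟩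
  have hwn : 1 ≤ wn := by exact_mod_cast hw1
  -- A side: fold of a constant-body loop = map over range
  have hA : group_ngrams p (wn : Int) f =
      (List.range (p.length / wn + 1)).map
        (fun i : Nat => gnChunk p (wn : Int) f ((i : Int) * (wn : Int))) := by
    show ((PySem.List.pyRange 0 (PySem.Int.floordiv (p.length : Int) (wn : Int) + 1) 1).foldl
        (fun st _ => gnStep p (wn : Int) f st) ([], 0)).1 = _
    rw [PySem.Int.floordiv_natCast, foldl_const_fun, gnStep_iterate]
    dsimp only
    rw [PySem.List.length_pyRange_one]
    congr 2
  -- B side: fold of the streaming loop = chunkRec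
  have hB : group_ngrams_alt p (wn : Int) f = chunkRec wn f p := by
    have h := b_eq_chunkRec wn f hwn (p.length / wn) p [] rfl
    rw [List.nil_append] at h
    exact h
  rw [hA, hB, chunk_map_eq wn f hwn (p.length / wn) p rfl]
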